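-- pv_equiv track=rewrite | github.com/RDHLaura/Tik-Tak-Toe | ia.py | eleccionJugada
-- ===== SOURCE A (Python) =====
-- def eleccionJugada(jugadas: dict):
--     maxValue = max(jugadas.values())
--     minValue = min(jugadas.values())
--     jugadaElegida = None
--     if abs(maxValue) >= abs(minValue):
--         jugadaElegida = maxValue
--     else:
--         jugadaElegida = minValue
--     for key in jugadas:
--         if jugadas[key] == jugadaElegida:
--             return key
-- ===== SOURCE B (Python) =====
-- def eleccionJugada(jugadas: dict):
--     return max(jugadas, key=lambda k: (abs(jugadas[k]), jugadas[k]))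
-- ===== Notes on version B (the rewrite author's own statement) =====
-- stated objective: simpler
-- what changed: Replaces A's three passes (max of values, min of values, then a scan for the first matching key) with a single argmax over the keys using the composite key (abs(value), value), whose lexicographic tie-break reproduces A's preference for the larger value and whose first-maximum rule reproduces A's first-key scan.
import Mathlib
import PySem

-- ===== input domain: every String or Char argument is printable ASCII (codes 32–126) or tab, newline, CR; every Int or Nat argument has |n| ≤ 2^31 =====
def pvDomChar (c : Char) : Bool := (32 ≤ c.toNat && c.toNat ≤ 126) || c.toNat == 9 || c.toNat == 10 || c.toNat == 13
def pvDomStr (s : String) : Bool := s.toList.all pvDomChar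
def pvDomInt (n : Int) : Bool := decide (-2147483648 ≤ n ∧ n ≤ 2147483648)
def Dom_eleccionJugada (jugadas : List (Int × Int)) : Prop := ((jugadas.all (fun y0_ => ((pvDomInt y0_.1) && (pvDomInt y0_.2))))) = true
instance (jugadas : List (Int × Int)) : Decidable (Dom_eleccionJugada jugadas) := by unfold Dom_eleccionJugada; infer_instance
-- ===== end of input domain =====

-- B replaces A's three passes (max, min, scan) with a single argmax over the keys
-- under the composite key (abs(value), value); objective: simpler.

-- ===== PORT A =====
-- the final 'for key in jugadas: if jugadas[key] == jugadaElegida: return key' loop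
-- (the 0 fallthrough is Python's implicit None, unreachable for a nonempty dict)
def eleccionJugadaLoop (d : PySem.Dict Int Int) (e : Int) : List Int → Int
  | [] => 0
  | k :: rest => if d.getD k 0 = e then k else eleccionJugadaLoop d e rest

def eleccionJugada (jugadas : List (Int × Int)) : Int :=
  let d := PySem.Dict.ofList jugadas
  let maxValue := (PySem.List.max? d.values (fun v => v)).getD 0
  let minValue := (PySem.List.min? d.values (fun v => v)).getD 0
  let jugadaElegida := if |maxValue| ≥ |minValue| then maxValue else minValue
  eleccionJugadaLoop d jugadaElegida d.keys

-- ===== PORT B =====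
def eleccionJugada_alt (jugadas : List (Int × Int)) : Int :=
  let d := PySem.Dict.ofList jugadas
  (PySem.List.max2? d.keys (fun k => |d.getD k 0|) (fun k => d.getD k 0)).getD 0

-- ===== PRECONDITION & SPEC =====
-- Pre_ excludes only the empty dict, on which A's max(jugadas.values()) raises ValueError.
def Pre_eleccionJugada (jugadas : List (Int × Int)) : Prop := jugadas ≠ []
instance (jugadas : List (Int × Int)) : Decidable (Pre_eleccionJugada jugadas) := by unfold Pre_eleccionJugada; infer_instance
def pvWitness_eleccionJugada : (List (Int × Int)) := ([(0, 1)])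

def Spec_eleccionJugada (jugadas : List (Int × Int)) (out : Int) : Prop := out = eleccionJugada_alt jugadas
instance (jugadas : List (Int × Int)) (out : Int) : Decidable (Spec_eleccionJugada jugadas out) := by unfold Spec_eleccionJugada; infer_instance

-- ===== CLAIM (what is proved, stated in full; the proofs are below) =====
def Claim_equal_eleccionJugada : Prop := ∀ (jugadas : List (Int × Int)), Dom_eleccionJugada jugadas → Pre_eleccionJugada jugadas → Spec_eleccionJugada jugadas (eleccionJugada jugadas)

-- ===== LEMMAS AND PROOFS =====

-- first key of the items list whose value is e (0 when absent)
def pvScan (e : Int) : List (Int × Int) → Int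
  | [] => 0
  | p :: t => if p.2 = e then p.1 else pvScan e t

-- the pair-level step of max2? with keys (|·.2|, ·.2)
def pvStep (a : Option (Int × Int)) (p : Int × Int) : Option (Int × Int) :=
  match a with
  | none => some p
  | some m => if (decide (|m.2| < |p.2|) || !decide (|p.2| < |m.2|) && decide (m.2 < p.2)) = true then some p else some m

-- A's key loop over l.map .1 is the pure scan over the items l
lemma pvLoop_eq_scan (d : PySem.Dict Int Int) (e : Int) :
    ∀ l : List (Int × Int), (∀ p ∈ l, d.getD p.1 0 = p.2) →
      eleccionJugadaLoop d e (l.map Prod.fst) = pvScan e l := by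
  intro l
  induction l with
  | nil => intro _; rfl
  | cons p t ih =>
    intro h
    have hp : d.getD p.1 0 = p.2 := h p (List.mem_cons_self ..)
    simp only [List.map_cons, eleccionJugadaLoop, pvScan, hp]
    split
    · rfl
    · exact ih (fun q hq => h q (List.mem_cons_of_mem _ hq))

-- the key-level step of B's argmax: pvStep read through the dict lookup
def pvStepK (d : PySem.Dict Int Int) : Option Int → Int → Option Int :=
  fun a k => match a with
    | none => some k
    | some mk => if (decide (|d.getD mk 0| < |d.getD k 0|) ||
        !decide (|d.getD k 0| < |d.getD mk 0|) && decide (d.getD mk 0 < d.getD k 0)) = true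
        then some k else some mk

-- B's key-level fold is the pair-level fold pvStep, projected to keys
lemma pvFold_keys_eq (d : PySem.Dict Int Int) :
    ∀ (l : List (Int × Int)) (acc : Option (Int × Int)),
      (∀ p ∈ l, d.getD p.1 0 = p.2) → (∀ m, acc = some m → d.getD m.1 0 = m.2) →
      List.foldl (pvStepK d) (acc.map Prod.fst) (l.map Prod.fst)
      = (List.foldl pvStep acc l).map Prod.fst := by
  intro l
  induction l with
  | nil => intro acc _ _; rfl
  | cons p t ih =>
    intro acc hl hacc
    have hp : d.getD p.1 0 = p.2 := hl p (List.mem_cons_self ..)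
    have hstep : pvStepK d (acc.map Prod.fst) p.1 = (pvStep acc p).map Prod.fst := by
      cases acc with
      | none => rfl
      | some m =>
        have hm : d.getD m.1 0 = m.2 := hacc m rfl
        simp only [Option.map_some, pvStepK, pvStep, hm, hp]
        split <;> rfl
    simp only [List.map_cons, List.foldl_cons, hstep]
    exact ih (pvStep acc p) (fun q hq => hl q (List.mem_cons_of_mem _ hq))
      (by
        intro m hm
        cases acc with
        | none => simp only [pvStep] at hm; cases hm; exact hp
        | some m0 =>
          simp only [pvStep] at hm
          split at hm
          · cases hm; exact hp
          · cases hm; exact hacc _ rfl)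

-- the argmax fold with a lex-maximal target e finds the first pair with value e
lemma pvArgmax_eq_scan (e : Int) :
    ∀ (l : List (Int × Int)) (m : Int × Int),
      (|m.2| < |e| ∨ (|m.2| = |e| ∧ m.2 ≤ e)) →
      (∀ p ∈ l, |p.2| < |e| ∨ (|p.2| = |e| ∧ p.2 ≤ e)) →
      (m.2 = e ∨ e ∈ l.map Prod.snd) →
      (List.foldl pvStep (some m) l).map Prod.fst
        = some (if m.2 = e then m.1 else pvScan e l) := by
  intro l
  induction l with
  | nil =>
    intro m _ _ he
    have hme : m.2 = e := by simpa using he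
    simp [hme]
  | cons p t ih =>
    intro m hm hl he
    have hp := hl p (List.mem_cons_self ..)
    have hl' : ∀ q ∈ t, |q.2| < |e| ∨ (|q.2| = |e| ∧ q.2 ≤ e) :=
      fun q hq => hl q (List.mem_cons_of_mem _ hq)
    by_cases hme : m.2 = e
    · have hcond : ¬ ((decide (|m.2| < |p.2|) || !decide (|p.2| < |m.2|) && decide (m.2 < p.2)) = true) := by
        simp only [Bool.or_eq_true, Bool.and_eq_true, Bool.not_eq_true', decide_eq_true_eq,
          decide_eq_false_iff_not]
        rw [hme]
        rcases hp with h | ⟨h1, h2⟩ <;> omega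
      simp only [List.foldl_cons, pvStep, if_neg hcond]
      rw [ih m hm hl' (Or.inl hme)]
      simp [hme]
    · by_cases hpe : p.2 = e
      · have hcond : (decide (|m.2| < |p.2|) || !decide (|p.2| < |m.2|) && decide (m.2 < p.2)) = true := by
          simp only [Bool.or_eq_true, Bool.and_eq_true, Bool.not_eq_true', decide_eq_true_eq,
            decide_eq_false_iff_not]
          rw [hpe]
          rcases hm with h | ⟨h1, h2⟩ <;> omega
        simp only [List.foldl_cons, pvStep, if_pos hcond]
        rw [ih p (Or.inr ⟨by rw [hpe], le_of_eq hpe⟩) hl' (Or.inl hpe)]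
        simp [hme, hpe, pvScan]
      · have he' : e ∈ t.map Prod.snd := by
          rcases he with h | h
          · exact absurd h hme
          · simp only [List.map_cons, List.mem_cons] at h
            rcases h with h | h
            · exact absurd h.symm hpe
            · exact h
        simp only [List.foldl_cons, pvStep]
        split
        · rw [ih p hp hl' (Or.inr he')]
          simp [hpe, pvScan]
        · rw [ih m hm hl' (Or.inr he')]
          simp [hpe, hme, pvScan]

-- ===== VERDICT (by name: the statement is the Claim_ definition above) =====
theorem eleccionJugada_spec : Claim_equal_eleccionJugada := by
  intro jugadas _ hpre
  unfold Spec_eleccionJugada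
  set d := PySem.Dict.ofList jugadas with hd
  have hnd : d.keys.Nodup := PySem.Dict.nodup_keys_ofList jugadas
  have hget : ∀ p ∈ d.items, d.getD p.1 0 = p.2 := by
    rintro ⟨k, v⟩ hp
    have := PySem.Dict.get?_of_mem_items d hp hnd
    simp [PySem.Dict.getD, this]
  -- the dict of a nonempty association list is nonempty
  have hkeys : d.keys = PySem.Set.ofList (jugadas.map Prod.fst) := by
    rw [hd]
    show (List.foldl (fun acc p => acc.insert p.1 p.2) PySem.Dict.empty jugadas).keys = _
    rw [PySem.Dict.keys_foldl_insert_key jugadas Prod.fst (fun _ p => p.2) PySem.Dict.empty]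
    simp [PySem.Set.update_nil_left]
  have hne : d.items ≠ [] := by
    cases hjl : jugadas with
    | nil => exact absurd hjl hpre
    | cons j js =>
      intro hitems
      have h1 : j.1 ∈ d.keys := by
        rw [hkeys, hjl]
        exact (PySem.Set.mem_ofList _ _).2 (by simp)
      rw [show d.keys = d.items.map Prod.fst from rfl, hitems] at h1
      simp at h1
  obtain ⟨q, rest, hqr⟩ := List.exists_cons_of_ne_nil hne
  have hvals : d.values = d.items.map Prod.snd := rfl
  -- the extrema of the values
  have hvne : d.values ≠ [] := by rw [hvals, hqr]; simp
  obtain ⟨M, hM⟩ : ∃ M, PySem.List.max? d.values (fun v => v) = some M := by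
    cases h : PySem.List.max? d.values (fun v => v) with
    | none => exact absurd ((PySem.List.max?_eq_none_iff _ _).1 h) hvne
    | some M => exact ⟨M, rfl⟩
  obtain ⟨mn, hmn⟩ : ∃ mn, PySem.List.min? d.values (fun v => v) = some mn := by
    cases h : PySem.List.min? d.values (fun v => v) with
    | none => exact absurd ((PySem.List.min?_eq_none_iff _ _).1 h) hvne
    | some mn => exact ⟨mn, rfl⟩
    
  have hMmax : ∀ v ∈ d.values, v ≤ M := fun v hv => PySem.List.max?_isMax hM v hv
  have hmnmin : ∀ v ∈ d.values, mn ≤ v := fun v hv => PySem.List.min?_isMin hmn v hv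
  set e : Int := if |M| ≥ |mn| then M else mn with hedef
  have he_mem : e ∈ d.values := by
    rw [hedef]; split
    · exact PySem.List.max?_mem hM
    · exact PySem.List.min?_mem hmn
  have he_lex : ∀ p ∈ d.items, |p.2| < |e| ∨ (|p.2| = |e| ∧ p.2 ≤ e) := by
    intro p hp
    have hv : p.2 ∈ d.values := by rw [hvals]; exact List.mem_map_of_mem hp
    have h1 := hMmax _ hv
    have h2 := hmnmin _ hv
    rw [hedef]
    rcases abs_cases M with ⟨hM1, hM2⟩ | ⟨hM1, hM2⟩ <;>
      rcases abs_cases mn with ⟨hn1, hn2⟩ | ⟨hn1, hn2⟩ <;>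
        rcases abs_cases p.2 with ⟨hp1, hp2⟩ | ⟨hp1, hp2⟩ <;> split <;> omega
  -- A reduces to the pure scan
  have hA : eleccionJugada jugadas = pvScan e d.items := by
    show (let d' := PySem.Dict.ofList jugadas;
      let maxValue := (PySem.List.max? d'.values (fun v => v)).getD 0;
      let minValue := (PySem.List.min? d'.values (fun v => v)).getD 0;
      let jugadaElegida := if |maxValue| ≥ |minValue| then maxValue else minValue;
      eleccionJugadaLoop d' jugadaElegida d'.keys) = _
    rw [← hd]
    simp only [hM, hmn, Option.getD_some, ← hedef]
    rw [show d.keys = d.items.map Prod.fst from rfl]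
    exact pvLoop_eq_scan d e d.items hget
  -- B reduces to the same scan
  have hB : eleccionJugada_alt jugadas = pvScan e d.items := by
    show ((PySem.List.max2? (PySem.Dict.ofList jugadas).keys
        (fun k => |(PySem.Dict.ofList jugadas).getD k 0|)
        (fun k => (PySem.Dict.ofList jugadas).getD k 0)).getD 0) = _
    rw [← hd]
    have hmax2 : PySem.List.max2? d.keys (fun k => |d.getD k 0|) (fun k => d.getD k 0)
        = (List.foldl pvStep none d.items).map Prod.fst := by
      rw [show d.keys = d.items.map Prod.fst from rfl]
      have h1 : PySem.List.max2? (d.items.map Prod.fst) (fun k => |d.getD k 0|) (fun k => d.getD k 0)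
          = List.foldl (pvStepK d) none (d.items.map Prod.fst) := by
        unfold PySem.List.max2?
        congr 1
        funext a k
        cases a <;> rfl
      rw [h1]
      simpa using pvFold_keys_eq d d.items none hget (fun m hm => by cases hm)
    rw [hmax2, hqr, List.foldl_cons]
    have hq2 : q.2 ∈ d.values := by rw [hvals, hqr]; simp
    have hscan := pvArgmax_eq_scan e rest q
      (he_lex q (by rw [hqr]; exact List.mem_cons_self ..))
      (fun p hp => he_lex p (by rw [hqr]; exact List.mem_cons_of_mem _ hp))
      (by
        have : e ∈ (q :: rest).map Prod.snd := by rw [← hqr, ← hvals]; exact he_mem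
        simp only [List.map_cons, List.mem_cons] at this
        rcases this with h | h
        · exact Or.inl h.symm
        · exact Or.inr h)
    show ((List.foldl pvStep (pvStep none q) rest).map Prod.fst).getD 0 = _
    rw [show pvStep none q = some q from rfl, hscan]
    simp [pvScan]
  rw [hA, hB]
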